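-- pv_equiv track=rewrite | github.com/aditya7e/abbc | question13.py | calculate_marks
-- ===== SOURCE A (Python) =====
-- def calculate_marks(correct_answers, student_responses):
--     marks = 0
--     for question, correct_option in correct_answers.items():
--         student_response = student_responses.get(question, "").upper()
--         if student_response == correct_option:
--             marks += 4
--         elif student_response != "":
--             marks -= 1
--     return max(0, marks)
-- ===== SOURCE B (Python) =====
-- def calculate_marks(correct_answers, student_responses):
--     # Set-algebra formulation: classify question ids into sets, then score by set sizes.
--     upper_resp = {q: r.upper() for q, r in student_responses.items()}
--     answered = {q for q, r in upper_resp.items() if r != ""}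
--     correct = {q for q, opt in correct_answers.items()
--                if upper_resp.get(q, "") == opt}
--     wrong = (answered & correct_answers.keys()) - correct
--     return max(0, 4 * len(correct) - len(wrong))
-- ===== Notes on version B (the rewrite author's own statement) =====
-- stated objective: alternative
-- what changed: Replaces A's per-question running-mark accumulator with a set-algebra formulation: build the set of answered question ids and the set of correctly answered ones, obtain the wrong ones as (answered & keys) - correct, and score from the set cardinalities.
import Mathlib
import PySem

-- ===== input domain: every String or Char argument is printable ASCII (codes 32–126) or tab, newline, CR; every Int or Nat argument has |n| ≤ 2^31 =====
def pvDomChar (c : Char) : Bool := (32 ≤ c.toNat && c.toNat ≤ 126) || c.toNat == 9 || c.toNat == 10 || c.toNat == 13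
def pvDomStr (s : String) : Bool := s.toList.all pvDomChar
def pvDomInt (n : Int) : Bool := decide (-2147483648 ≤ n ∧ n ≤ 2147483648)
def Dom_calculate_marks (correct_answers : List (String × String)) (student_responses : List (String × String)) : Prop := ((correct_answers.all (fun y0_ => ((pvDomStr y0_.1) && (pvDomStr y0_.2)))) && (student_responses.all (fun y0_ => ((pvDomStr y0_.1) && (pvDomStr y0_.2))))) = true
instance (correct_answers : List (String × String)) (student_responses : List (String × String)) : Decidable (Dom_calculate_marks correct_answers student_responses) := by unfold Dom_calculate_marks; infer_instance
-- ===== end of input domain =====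

-- B replaces A's per-question running-mark accumulator by set algebra over question ids
-- (answered / correct sets, wrong = (answered & keys) - correct, score from cardinalities);
-- objective: alternative decomposition, same cost.

-- ===== PORT A =====
def calculate_marks (correct_answers : List (String × String)) (student_responses : List (String × String)) : Int :=
  let marks : Int := correct_answers.foldl (fun marks qc =>
    let student_response := PySem.Str.upper ((PySem.Dict.mk student_responses).getD qc.1 "")
    if student_response = qc.2 then marks + 4
    else if student_response ≠ "" then marks - 1
    else marks) 0
  max 0 marks

-- ===== PORT B =====
def calculate_marks_alt (correct_answers : List (String × String)) (student_responses : List (String × String)) : Int :=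
  -- dict comprehension over the dict student_responses: elementwise map is exact, its keys being distinct (Pre_)
  let upper_resp : List (String × String) := student_responses.map (fun p => (p.1, PySem.Str.upper p.2))
  let answered : PySem.Set String :=
    PySem.Set.ofList ((upper_resp.filter (fun p => p.2 != "")).map Prod.fst)
  let correct : PySem.Set String :=
    PySem.Set.ofList ((correct_answers.filter
      (fun qc => (PySem.Dict.mk upper_resp).getD qc.1 "" == qc.2)).map Prod.fst)
  let wrong : PySem.Set String :=
    PySem.Set.diff (PySem.Set.inter answered (correct_answers.map Prod.fst)) correct
  max 0 (4 * PySem.Set.len correct - PySem.Set.len wrong)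

-- ===== PRECONDITION & SPEC =====
-- The two arguments are Python dicts, so their association lists have distinct keys; Pre_
-- states exactly that and excludes no input the Python function can be called on.
def Pre_calculate_marks (correct_answers : List (String × String)) (student_responses : List (String × String)) : Prop :=
  (correct_answers.map Prod.fst).Nodup ∧ (student_responses.map Prod.fst).Nodup
instance (correct_answers : List (String × String)) (student_responses : List (String × String)) : Decidable (Pre_calculate_marks correct_answers student_responses) := by unfold Pre_calculate_marks; infer_instance
def pvWitness_calculate_marks : (List (String × String)) × (List (String × String)) :=
  ([("q1", "A"), ("q2", "B")], [("q1", "a"), ("q3", "b")])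

def Spec_calculate_marks (correct_answers : List (String × String)) (student_responses : List (String × String)) (out : Int) : Prop := out = calculate_marks_alt correct_answers student_responses
instance (correct_answers : List (String × String)) (student_responses : List (String × String)) (out : Int) : Decidable (Spec_calculate_marks correct_answers student_responses out) := by unfold Spec_calculate_marks; infer_instance

-- ===== CLAIM (what is proved, stated in full; the proofs are below) =====
def Claim_equal_calculate_marks : Prop := ∀ (correct_answers : List (String × String)) (student_responses : List (String × String)), Dom_calculate_marks correct_answers student_responses → Pre_calculate_marks correct_answers student_responses → Spec_calculate_marks correct_answers student_responses (calculate_marks correct_answers student_responses)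

-- ===== LEMMAS AND PROOFS =====

-- the response A compares against, as a function of the question id
def respOf (sr : List (String × String)) (q : String) : String :=
  PySem.Str.upper ((PySem.Dict.mk sr).getD q "")

-- looking up in the uppercased copy = uppercasing the lookup
theorem getD_map_upper (sr : List (String × String)) (q : String) :
    (PySem.Dict.mk (sr.map (fun p => (p.1, PySem.Str.upper p.2)))).getD q "" = respOf sr q := by
  induction sr with
  | nil => rfl
  | cons p t ih =>
    obtain ⟨k, v⟩ := p
    simp only [List.map_cons, respOf, PySem.Dict.getD, PySem.Dict.get?_mk_cons] at *
    by_cases h : k == q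
    · simp [h]
    · simp only [h] at *
      exact ih

-- A's loop computes 4·(#correct) − (#wrong attempts)
theorem calculate_marks_foldl (sr : List (String × String)) (l : List (String × String)) (m : Int) :
    l.foldl (fun marks qc =>
      let student_response := PySem.Str.upper ((PySem.Dict.mk sr).getD qc.1 "")
      if student_response = qc.2 then marks + 4
      else if student_response ≠ "" then marks - 1
      else marks) m
    = m + 4 * (l.countP (fun qc => respOf sr qc.1 == qc.2) : Int)
        - (l.countP (fun qc => respOf sr qc.1 != "" && respOf sr qc.1 != qc.2) : Int) := by
  induction l generalizing m with
  | nil => simp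
  | cons hd tl ih =>
    simp only [List.foldl_cons, List.countP_cons, ih]
    by_cases h1 : respOf sr hd.1 = hd.2
    · simp [respOf] at h1
      simp [h1, respOf]
      ring
    · by_cases h2 : respOf sr hd.1 = ""
      · have h3 : ¬ (hd.2 = "") := by
          intro h; exact h1 (h2.trans h.symm)
        simp [respOf] at h1 h2
        simp [h2, h3, respOf]
      · simp [respOf] at h1 h2
        simp [h1, h2, respOf]
        ring

-- key uniqueness in a dict's association list
theorem mem_unique_of_nodup_keys {ca : List (String × String)}
    (h : (ca.map Prod.fst).Nodup) {q a b : String}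
    (ha : (q, a) ∈ ca) (hb : (q, b) ∈ ca) : a = b := by
  have hka : (PySem.Dict.mk ca).getD q "" = a :=
    PySem.Dict.getD_of_mem_items (PySem.Dict.mk ca) (by simpa using ha) (by simpa using h) ""
  have hkb : (PySem.Dict.mk ca).getD q "" = b :=
    PySem.Dict.getD_of_mem_items (PySem.Dict.mk ca) (by simpa using hb) (by simpa using h) ""
  exact hka.symm.trans hkb

-- membership in the answered list = nonempty response
theorem mem_answered_iff (sr : List (String × String)) (h2 : (sr.map Prod.fst).Nodup) (q : String) :
    q ∈ ((sr.map (fun p => (p.1, PySem.Str.upper p.2))).filter (fun p => p.2 != "")).map Prod.fst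
      ↔ respOf sr q ≠ "" := by
  constructor
  · intro hq
    obtain ⟨p, hp, rfl⟩ := List.mem_map.mp hq
    have hmem := List.mem_filter.mp hp
    have hnd : ((sr.map (fun p => (p.1, PySem.Str.upper p.2))).map Prod.fst).Nodup := by
      simpa [List.map_map, Function.comp] using h2
    have := PySem.Dict.getD_of_mem_items
      (PySem.Dict.mk (sr.map (fun p => (p.1, PySem.Str.upper p.2))))
      (k := p.1) (v := p.2) (by simpa using hmem.1) (by simpa using hnd) ""
    rw [getD_map_upper] at this
    rw [this]
    simpa using hmem.2
  · intro hne
    have hsome : ∃ v, (PySem.Dict.mk (sr.map (fun p => (p.1, PySem.Str.upper p.2)))).get? q = some v := by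
      rcases hv : (PySem.Dict.mk (sr.map (fun p => (p.1, PySem.Str.upper p.2)))).get? q with _ | v
      · exfalso
        apply hne
        rw [← getD_map_upper sr q, PySem.Dict.getD_eq_get?_getD, hv]
        rfl
      · exact ⟨v, hv⟩
    obtain ⟨v, hv⟩ := hsome
    have hmemit : (q, v) ∈ (sr.map (fun p => (p.1, PySem.Str.upper p.2))) := by
      simpa using PySem.Dict.mem_items_of_get?_eq_some _ hv
    have hvne : v ≠ "" := by
      intro hv0
      apply hne
      rw [← getD_map_upper sr q, PySem.Dict.getD_eq_get?_getD, hv, hv0]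
      rfl
    exact List.mem_map.mpr ⟨(q, v), List.mem_filter.mpr ⟨hmemit, by simpa using hvne⟩, rfl⟩

-- membership in the correct list
theorem mem_correct_iff (ca sr : List (String × String)) (q : String) :
    q ∈ ((ca.filter (fun qc => (PySem.Dict.mk (sr.map (fun p => (p.1, PySem.Str.upper p.2)))).getD qc.1 "" == qc.2)).map Prod.fst)
      ↔ ∃ opt, (q, opt) ∈ ca ∧ respOf sr q = opt := by
  constructor
  · intro hq
    obtain ⟨p, hp, rfl⟩ := List.mem_map.mp hq
    have hmem := List.mem_filter.mp hp
    refine ⟨p.2, by simpa using hmem.1, ?_⟩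
    have := hmem.2
    rw [getD_map_upper] at this
    simpa using this
  · rintro ⟨opt, hmem, heq⟩
    exact List.mem_map.mpr ⟨(q, opt),
      List.mem_filter.mpr ⟨hmem, by rw [getD_map_upper]; simpa using heq⟩, rfl⟩

-- the wrong-set cardinality equals A's wrong-attempt count
theorem wrong_length (ca sr : List (String × String))
    (h1 : (ca.map Prod.fst).Nodup) (h2 : (sr.map Prod.fst).Nodup) :
    ((((sr.map (fun p => (p.1, PySem.Str.upper p.2))).filter (fun p => p.2 != "")).map Prod.fst).filter
        (fun q => !PySem.Set.contains ((ca.filter (fun qc => (PySem.Dict.mk (sr.map (fun p => (p.1, PySem.Str.upper p.2)))).getD qc.1 "" == qc.2)).map Prod.fst) q &&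
          PySem.Set.contains (ca.map Prod.fst) q)).length
      = ca.countP (fun qc => respOf sr qc.1 != "" && respOf sr qc.1 != qc.2) := by
  have hperm :
      ((ca.filter (fun qc => respOf sr qc.1 != "" && respOf sr qc.1 != qc.2)).map Prod.fst).Perm
      ((((sr.map (fun p => (p.1, PySem.Str.upper p.2))).filter (fun p => p.2 != "")).map Prod.fst).filter
        (fun q => !PySem.Set.contains ((ca.filter (fun qc => (PySem.Dict.mk (sr.map (fun p => (p.1, PySem.Str.upper p.2)))).getD qc.1 "" == qc.2)).map Prod.fst) q &&
          PySem.Set.contains (ca.map Prod.fst) q)) := by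
    apply (List.perm_ext_iff_of_nodup ?_ ?_).mpr
    · intro q
      constructor
      · intro hq
        obtain ⟨p, hp, rfl⟩ := List.mem_map.mp hq
        have hmem := List.mem_filter.mp hp
        have hcond := hmem.2
        simp only [Bool.and_eq_true, bne_iff_ne, ne_eq] at hcond
        refine List.mem_filter.mpr ⟨(mem_answered_iff sr h2 p.1).mpr hcond.1, ?_⟩
        simp only [PySem.Set.contains_eq_listContains, Bool.and_eq_true, Bool.not_eq_true', List.contains_eq_mem, decide_eq_true_eq, decide_eq_false_iff_not]
        constructor
        · intro hc
          obtain ⟨opt, hopt, heq⟩ := (mem_correct_iff ca sr p.1).mp hc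
          have : opt = p.2 := mem_unique_of_nodup_keys h1 hopt (by simpa using hmem.1)
          exact hcond.2 (this ▸ heq)
        · exact List.mem_map.mpr ⟨p, hmem.1, rfl⟩
      · intro hq
        have hmem := List.mem_filter.mp hq
        have hne : respOf sr q ≠ "" := (mem_answered_iff sr h2 q).mp hmem.1
        have hcond := hmem.2
        simp only [PySem.Set.contains_eq_listContains, Bool.and_eq_true, Bool.not_eq_true', List.contains_eq_mem, decide_eq_true_eq, decide_eq_false_iff_not] at hcond
        obtain ⟨opt, hopt⟩ : ∃ opt, (q, opt) ∈ ca := by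
          obtain ⟨p, hp, hfst⟩ := List.mem_map.mp hcond.2
          exact ⟨p.2, by rwa [← hfst, Prod.mk.eta]⟩
        have hneq : respOf sr q ≠ opt := by
          intro heq
          exact hcond.1 ((mem_correct_iff ca sr q).mpr ⟨opt, hopt, heq⟩)
        refine List.mem_map.mpr ⟨(q, opt), List.mem_filter.mpr ⟨hopt, ?_⟩, rfl⟩
        simp [hne, hneq]
    · exact (List.filter_sublist.map Prod.fst).nodup h1
    · apply List.Nodup.filter
      apply List.Sublist.nodup (l₂ := (sr.map (fun p => (p.1, PySem.Str.upper p.2))).map Prod.fst)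
      · exact List.filter_sublist.map Prod.fst
      · simpa [List.map_map, Function.comp] using h2
  calc _ = ((ca.filter (fun qc => respOf sr qc.1 != "" && respOf sr qc.1 != qc.2)).map Prod.fst).length :=
        hperm.length_eq.symm
    _ = _ := by rw [List.length_map, ← List.countP_eq_length_filter]

-- ===== VERDICT (by name: the statement is the Claim_ definition above) =====
theorem calculate_marks_spec : Claim_equal_calculate_marks := by
  intro ca sr _ hpre
  obtain ⟨h1, h2⟩ := hpre
  unfold Spec_calculate_marks calculate_marks calculate_marks_alt
  rw [calculate_marks_foldl]
  -- simplify B's set operations into list filters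
  simp only [PySem.Set.inter, PySem.Set.diff, PySem.Set.len]
  -- both ofList's arguments are Nodup, so set() keeps them as they are
  have hc : PySem.Set.ofList ((ca.filter
        (fun qc => (PySem.Dict.mk (sr.map (fun p => (p.1, PySem.Str.upper p.2)))).getD qc.1 "" == qc.2)).map Prod.fst)
      = (ca.filter
        (fun qc => (PySem.Dict.mk (sr.map (fun p => (p.1, PySem.Str.upper p.2)))).getD qc.1 "" == qc.2)).map Prod.fst :=
    PySem.Set.ofList_eq_self_of_nodup _ ((List.filter_sublist.map Prod.fst).nodup h1)
  have ha : PySem.Set.ofList (((sr.map (fun p => (p.1, PySem.Str.upper p.2))).filter (fun p => p.2 != "")).map Prod.fst)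
      = ((sr.map (fun p => (p.1, PySem.Str.upper p.2))).filter (fun p => p.2 != "")).map Prod.fst :=
    PySem.Set.ofList_eq_self_of_nodup _ (by
      apply List.Sublist.nodup (l₂ := (sr.map (fun p => (p.1, PySem.Str.upper p.2))).map Prod.fst)
      · exact List.filter_sublist.map Prod.fst
      · simpa [List.map_map, Function.comp] using h2)
  rw [hc, ha]
  rw [List.filter_filter]
  rw [wrong_length ca sr h1 h2]
  rw [List.length_map, ← List.countP_eq_length_filter]
  have hcong : List.countP (fun qc => (PySem.Dict.mk (sr.map (fun p => (p.1, PySem.Str.upper p.2)))).getD qc.1 "" == qc.2) ca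
      = List.countP (fun qc => respOf sr qc.1 == qc.2) ca :=
    List.countP_congr (fun qc _ => by rw [getD_map_upper])
  rw [hcong]
  ring_nf
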